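-- pv_equiv track=rewrite | github.com/snugpenguin968/Word-Segmentation | app.py | get_dividers
-- ===== SOURCE A (Python) =====
-- def get_dividers(vertical_projection,height,avg_white_space_length):
--     whitespace_length = 0
--     divider_indices = []
--     for index, vp in enumerate(vertical_projection):
--         if vp == height:
--             whitespace_length = whitespace_length + 1
--         elif vp != height:
--             if whitespace_length != 0 and whitespace_length > avg_white_space_length:
--                 divider_indices.append(index-int(whitespace_length/2))
--             whitespace_length = 0
--     return divider_indices
-- ===== SOURCE B (Python) =====
-- def get_dividers(vertical_projection, height, avg_white_space_length):
--     # Phase 1: compress the projection into maximal runs of (is_whitespace, length).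
--     runs = []
--     cur = None
--     length = 0
--     for v in vertical_projection:
--         w = (v == height)
--         if w == cur:
--             length += 1
--         else:
--             if cur is not None:
--                 runs.append((cur, length))
--             cur = w
--             length = 1
--     if cur is not None:
--         runs.append((cur, length))
--     # Phase 2: every sufficiently long whitespace run that is not the final run
--     # yields a divider at its midpoint (run end minus half its length).
--     result = []
--     start = 0
--     for i, (w, length) in enumerate(runs):
--         if w and i < len(runs) - 1 and length > avg_white_space_length:
--             result.append(start + length - length // 2)
--         start += length
--     return result
-- ===== Notes on version B (the rewrite author's own statement) =====
-- stated objective: alternative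
-- what changed: A's single stateful scan with a running whitespace counter is replaced by a two-phase decomposition: first compress the projection into maximal (is_whitespace, length) runs, then emit one midpoint divider per sufficiently long whitespace run that is not the final run.
import Mathlib
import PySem

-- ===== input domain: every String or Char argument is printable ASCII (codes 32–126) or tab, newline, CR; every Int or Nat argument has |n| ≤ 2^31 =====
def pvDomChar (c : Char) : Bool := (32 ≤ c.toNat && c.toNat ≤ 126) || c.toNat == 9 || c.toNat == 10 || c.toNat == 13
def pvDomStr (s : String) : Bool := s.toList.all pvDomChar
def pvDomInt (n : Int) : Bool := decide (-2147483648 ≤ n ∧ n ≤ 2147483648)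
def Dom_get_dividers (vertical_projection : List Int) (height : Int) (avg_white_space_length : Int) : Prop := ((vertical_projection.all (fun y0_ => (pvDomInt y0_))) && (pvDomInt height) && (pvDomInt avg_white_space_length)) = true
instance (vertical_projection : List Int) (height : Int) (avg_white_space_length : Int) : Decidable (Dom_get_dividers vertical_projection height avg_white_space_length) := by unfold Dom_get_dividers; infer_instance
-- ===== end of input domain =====

-- B replaces A's single stateful scan by a two-phase decomposition (compress into
-- maximal runs, then emit a midpoint per qualifying non-final whitespace run); objective: alternative.

-- ===== PORT A =====
-- A's whitespace counter is a nonnegative Python int; it is ported as a Nat, and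
-- Python's int(wl/2) on a nonnegative int equals Nat division wl / 2 (both truncate).
def gdStepA (height avg : Int) (st : Nat × List Int) (p : Int × Int) : Nat × List Int :=
  if p.2 == height then (st.1 + 1, st.2)
  else if st.1 ≠ 0 ∧ (st.1 : Int) > avg then
    (0, st.2 ++ [p.1 - ((st.1 / 2 : Nat) : Int)])
  else (0, st.2)

def get_dividers (vertical_projection : List Int) (height : Int) (avg_white_space_length : Int) : List Int :=
  ((PySem.List.enumerate vertical_projection).foldl (gdStepA height avg_white_space_length) (0, [])).2

-- ===== PORT B =====
-- Phase 1 step: extend the open run or flush it and open a new one (Source B's first loop).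
def gdRunStep (height : Int) (st : Option Bool × Nat × List (Bool × Nat)) (v : Int) :
    Option Bool × Nat × List (Bool × Nat) :=
  let w := v == height
  if some w == st.1 then (st.1, st.2.1 + 1, st.2.2)
  else match st.1 with
    | some c => (some w, 1, st.2.2 ++ [(c, st.2.1)])
    | none => (some w, 1, st.2.2)

-- Source B's trailing "if cur is not None: runs.append((cur, length))".
def gdFinish (st : Option Bool × Nat × List (Bool × Nat)) : List (Bool × Nat) :=
  match st.1 with
  | some c => st.2.2 ++ [(c, st.2.1)]
  | none => st.2.2

def gdRuns (vertical_projection : List Int) (height : Int) : List (Bool × Nat) :=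
  gdFinish (vertical_projection.foldl (gdRunStep height) (none, 0, []))

-- Phase 2 step (Source B's second loop); L = len(runs), run lengths are nonnegative ints (Nat).
def gdStep2 (avg L : Int) (st : Int × List Int) (p : Int × (Bool × Nat)) : Int × List Int :=
  if p.2.1 = true ∧ p.1 < L - 1 ∧ ((p.2.2 : Int) > avg) then
    (st.1 + p.2.2, st.2 ++ [st.1 + (p.2.2 : Int) - ((p.2.2 / 2 : Nat) : Int)])
  else (st.1 + p.2.2, st.2)

def get_dividers_alt (vertical_projection : List Int) (height : Int) (avg_white_space_length : Int) : List Int :=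
  let runs := gdRuns vertical_projection height
  ((PySem.List.enumerate runs).foldl (gdStep2 avg_white_space_length (runs.length : Int)) (0, [])).2

-- ===== PRECONDITION & SPEC =====
def Spec_get_dividers (vertical_projection : List Int) (height : Int) (avg_white_space_length : Int) (out : List Int) : Prop := out = get_dividers_alt vertical_projection height avg_white_space_length
instance (vertical_projection : List Int) (height : Int) (avg_white_space_length : Int) (out : List Int) : Decidable (Spec_get_dividers vertical_projection height avg_white_space_length out) := by unfold Spec_get_dividers; infer_instance

-- ===== CLAIM (what is proved, stated in full; the proofs are below) =====
def Claim_equal_get_dividers : Prop := ∀ (vertical_projection : List Int) (height : Int) (avg_white_space_length : Int), Dom_get_dividers vertical_projection height avg_white_space_length → Spec_get_dividers vertical_projection height avg_white_space_length (get_dividers vertical_projection height avg_white_space_length)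

-- ===== LEMMAS AND PROOFS =====

-- Reference recursion for A's scan: remaining list, current index, current whitespace count.
def refA (height avg : Int) : List Int → Int → Nat → List Int
  | [], _, _ => []
  | v :: r, i, wl =>
    if v == height then refA height avg r (i + 1) (wl + 1)
    else (if wl ≠ 0 ∧ (wl : Int) > avg then [i - ((wl / 2 : Nat) : Int)] else [])
      ++ refA height avg r (i + 1) 0

-- Reference recursion for B's run compression, with an open run (c, len).
def refRuns (height : Int) : List Int → Bool → Nat → List (Bool × Nat)
  | [], c, len => [(c, len)]
  | v :: r, c, len =>
    if (v == height) = c then refRuns height r c (len + 1)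
    else (c, len) :: refRuns height r (v == height) 1

-- Reference recursion for B's second pass: a run emits iff white, not last, long enough.
def refP2 (avg : Int) : List (Bool × Nat) → Int → List Int
  | [], _ => []
  | (w, len) :: rest, start =>
    (if w = true ∧ rest ≠ [] ∧ ((len : Int) > avg) then [start + (len : Int) - ((len / 2 : Nat) : Int)] else [])
      ++ refP2 avg rest (start + len)

theorem refRuns_ne_nil (height : Int) (l : List Int) (c : Bool) (len : Nat) :
    refRuns height l c len ≠ [] := by
  induction l generalizing c len with
  | nil => simp [refRuns]
  | cons v r ih => simp only [refRuns]; split <;> simp [ih]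

theorem foldlA_eq_refA (height avg : Int) (l : List Int) (i : Int) (wl : Nat) (acc : List Int) :
    ((PySem.List.enumerate l i).foldl (gdStepA height avg) (wl, acc)).2
      = acc ++ refA height avg l i wl := by
  induction l generalizing i wl acc with
  | nil => simp [PySem.List.enumerate_nil, refA]
  | cons v r ih =>
    simp only [PySem.List.enumerate_cons, List.foldl_cons, refA, gdStepA]
    by_cases hv : v == height
    · simp [hv, ih]
    · simp only [hv, if_false, Bool.false_eq_true]
      by_cases hc : wl ≠ 0 ∧ (wl : Int) > avg
      · simp [hc, ih]
      · simp [hc, ih]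

theorem foldlRuns_eq_refRuns (height : Int) (l : List Int) (c : Bool) (len : Nat)
    (runs : List (Bool × Nat)) :
    gdFinish (l.foldl (gdRunStep height) (some c, len, runs)) = runs ++ refRuns height l c len := by
  induction l generalizing c len runs with
  | nil => simp [gdFinish, refRuns]
  | cons v r ih =>
    simp only [List.foldl_cons, gdRunStep, refRuns]
    by_cases hw : (v == height) = c
    · simp [hw, ih]
    · have : ¬ (some (v == height) = some c) := by simp [hw]
      simp [hw, this, ih]

theorem foldl2_eq_refP2 (avg L : Int) (rest : List (Bool × Nat)) (j start : Int)
    (acc : List Int) (hL : j + (rest.length : Int) = L) :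
    ((PySem.List.enumerate rest j).foldl (gdStep2 avg L) (start, acc)).2
      = acc ++ refP2 avg rest start := by
  induction rest generalizing j start acc with
  | nil => simp [PySem.List.enumerate_nil, refP2]
  | cons p r ih =>
    obtain ⟨w, len⟩ := p
    simp only [PySem.List.enumerate_cons, List.foldl_cons, refP2, gdStep2]
    have hnotlast : (j < L - 1) ↔ (r ≠ []) := by
      cases r with
      | nil => simp at hL ⊢; omega
      | cons q t => simp at hL ⊢; push_cast at hL; omega
    have hL' : (j + 1) + (r.length : Int) = L := by
      simp at hL; push_cast at hL ⊢; omega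
    by_cases hc : w = true ∧ r ≠ [] ∧ ((len : Int) > avg)
    · have hc' : w = true ∧ j < L - 1 ∧ ((len : Int) > avg) :=
        ⟨hc.1, hnotlast.mpr hc.2.1, hc.2.2⟩
      simp [hc, hc', ih _ _ _ hL']
    · have hc' : ¬ (w = true ∧ j < L - 1 ∧ ((len : Int) > avg)) := by
        intro h; exact hc ⟨h.1, hnotlast.mp h.2.1, h.2.2⟩
      simp [hc, hc', ih _ _ _ hL']

-- The bridge: B's two phases over an open run (c, len) compute A's scan continuation.
theorem refP2_refRuns_eq_refA (height avg : Int) (l : List Int) (i : Int) (c : Bool) (len : Nat)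
    (hlen : 1 ≤ len) :
    refP2 avg (refRuns height l c len) (i - (len : Int))
      = refA height avg l i (if c then len else 0) := by
  induction l generalizing i c len with
  | nil =>
    cases c <;> simp [refRuns, refP2, refA]
  | cons v r ih =>
    by_cases hw : (v == height) = c
    · have h1 : refRuns height (v :: r) c len = refRuns height r c (len + 1) := by
        simp [refRuns, hw]
      have h2 : i - (len : Int) = (i + 1) - ((len + 1 : Nat) : Int) := by push_cast; ring
      rw [h1, h2, ih (i + 1) c (len + 1) (by omega)]
      cases c with
      | true => simp only [refA]; rw [if_pos hw]; simp
      | false =>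
        have hv : ¬ (v == height) = true := by simp [hw]
        simp only [refA]; rw [if_neg hv]
        simp
    · have h1 : refRuns height (v :: r) c len = (c, len) :: refRuns height r (v == height) 1 := by
        simp [refRuns, hw]
      rw [h1]
      simp only [refP2]
      have hne : refRuns height r (v == height) 1 ≠ [] := refRuns_ne_nil _ _ _ _
      have h2 : i - (len : Int) + (len : Int) = (i + 1) - ((1 : Nat) : Int) := by push_cast; ring
      rw [h2, ih (i + 1) (v == height) 1 (le_refl 1)]
      have hz : len ≠ 0 := by omega
      cases c with
      | true =>
        have hv : ¬ (v == height) = true := by simp_all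
        have hvb : (v == height) = false := by simp_all
        rw [hvb] at hne
        simp only [refA]
        rw [if_neg hv]
        by_cases hg : (len : Int) > avg
        · simp only [hne, ne_eq, not_false_iff, and_true, true_and, hz, hvb,
            Bool.false_eq_true, if_false, Nat.cast_one, reduceIte, hg, if_true]
          have h3 : i + (1 : Int) - 1 = i := by ring
          rw [h3]
        · have hng : ¬ (len ≠ 0 ∧ (len : Int) > avg) := fun h => hg h.2
          simp [hg, hng, hvb]
      | false =>
        have hv : (v == height) = true := by
          cases hvb : (v == height) <;> simp_all
        simp only [refA]
        rw [if_pos hv]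
        simp [hv]

theorem get_dividers_eq_refA (vertical_projection : List Int) (height avg : Int) :
    get_dividers vertical_projection height avg = refA height avg vertical_projection 0 0 := by
  unfold get_dividers
  rw [foldlA_eq_refA]
  simp

theorem get_dividers_alt_eq (vertical_projection : List Int) (height avg : Int) :
    get_dividers_alt vertical_projection height avg
      = refP2 avg (gdRuns vertical_projection height) 0 := by
  unfold get_dividers_alt
  rw [foldl2_eq_refP2 _ _ _ _ _ _ (by simp)]
  simp

theorem gdRuns_cons (v : Int) (r : List Int) (height : Int) :
    gdRuns (v :: r) height = refRuns height r (v == height) 1 := by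
  unfold gdRuns
  simp only [List.foldl_cons, gdRunStep]
  simp [foldlRuns_eq_refRuns]

-- ===== VERDICT (by name: the statement is the Claim_ definition above) =====
theorem get_dividers_spec : Claim_equal_get_dividers := by
  intro vp height avg _
  unfold Spec_get_dividers
  rw [get_dividers_eq_refA, get_dividers_alt_eq]
  cases vp with
  | nil => simp [gdRuns, gdFinish, refA, refP2]
  | cons v r =>
    rw [gdRuns_cons]
    have := refP2_refRuns_eq_refA height avg r 1 (v == height) 1 (le_refl 1)
    simp only [Nat.cast_one, sub_self] at this
    rw [this]
    by_cases hv : (v == height) = true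
    · simp [refA, hv]
    · simp [refA, hv]
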